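-- pv_equiv track=rewrite | github.com/gabrielbessler/ProgrammingCompetition | WoC34/WoC34_2.py | maximumGcdAndSum
-- ===== SOURCE A (Python) =====
-- def maximumGcdAndSum(A, B):
--     ''' TODO '''
--
--     #We know that we cannot have a GCD higher than the maximum of a set
--     max_a, max_b = max(A), max(B)
--     maximum_possible_factor = min(max_a, max_b)
--     highest_val = max(max_a, max_b)
--
--     A = set(A)
--     B = set(B)
--
--     #We are going to start with the highest possible GCD and work our way down
--     for possible_gcd in range(maximum_possible_factor, 0, -1):
--
--         #For this given GCD to be our answer, it has to have a multiple in A and a multiple in B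
--         x = possible_gcd * (highest_val // possible_gcd)
--         fnum = 0
--         snum = 0
--         while x >= 1:
--             if fnum == 0:
--                 if x in A:
--                     fnum = x
--             if snum == 0:
--                 if x in B:
--                     snum = x
--             #We are going through each possible multiple of the GCD that will fit in the set
--             x -= possible_gcd
--
--         if fnum != 0 and snum != 0:
--             return fnum + snum
-- ===== SOURCE B (Python) =====
-- def maximumGcdAndSum(A, B):
--     limit = min(max(A), max(B))
--     for d in range(limit, 0, -1):
--         a = _best(d, A)
--         if a:
--             b = _best(d, B)
--             if b:
--                 return a + b
--
--
-- def _best(d, S):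
--     m = 0
--     for x in S:
--         if x >= 1 and x % d == 0 and x > m:
--             m = x
--     return m
-- ===== Notes on version B (the rewrite author's own statement) =====
-- stated objective: alternative
-- what changed: The inner enumeration of all multiples of each candidate gcd with set-membership tests is replaced by a single pass over the list elements taking the largest positive element divisible by the candidate, so no sets are built and per-candidate work is O(|A|+|B|) instead of O(maxval/d).
-- outside the precondition, e.g. on maximumGcdAndSum([-1], [2]): A returns None, B returns None; on maximumGcdAndSum([], [1]): A raises ValueError, B raises ValueError
import Mathlib
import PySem

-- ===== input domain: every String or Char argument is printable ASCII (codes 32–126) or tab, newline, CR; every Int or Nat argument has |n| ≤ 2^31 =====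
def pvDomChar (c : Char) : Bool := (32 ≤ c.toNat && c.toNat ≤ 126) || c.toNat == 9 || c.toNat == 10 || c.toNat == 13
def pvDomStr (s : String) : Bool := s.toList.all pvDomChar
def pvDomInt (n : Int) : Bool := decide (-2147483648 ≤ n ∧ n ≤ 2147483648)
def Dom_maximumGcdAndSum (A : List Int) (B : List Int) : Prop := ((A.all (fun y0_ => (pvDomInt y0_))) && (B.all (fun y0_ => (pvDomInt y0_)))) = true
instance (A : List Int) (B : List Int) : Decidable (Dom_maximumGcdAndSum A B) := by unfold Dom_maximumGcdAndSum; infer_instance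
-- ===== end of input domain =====

-- B replaces A's per-candidate enumeration of multiples with set-membership tests by a single
-- max-scan over the list elements per candidate gcd (objective: alternative; return values only).

-- ===== PORT A =====
-- inner 'while x >= 1' loop of A; k encodes possible_gcd = k+1 ≥ 1 (the loop only runs for positive d)
def pvAInner (Aset Bset : PySem.Set Int) (k : Nat) (x fnum snum : Int) : Int × Int :=
  if _h : 1 ≤ x then
    let fnum' := if fnum = 0 then (if PySem.Set.contains Aset x then x else fnum) else fnum
    let snum' := if snum = 0 then (if PySem.Set.contains Bset x then x else snum) else snum
    pvAInner Aset Bset k (x - ((k : Int) + 1)) fnum' snum'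
  else (fnum, snum)
  termination_by x.toNat
  decreasing_by omega


-- 'for possible_gcd in range(maximum_possible_factor, 0, -1)' as descending recursion; none = loop fell through (Python A returns None there)
def pvALoop (Aset Bset : PySem.Set Int) (highest : Int) : Nat → Option Int
  | 0 => none
  | k+1 =>
    let d : Int := (k : Int) + 1
    let x := d * (PySem.Int.floordiv highest d)
    let r := pvAInner Aset Bset k x 0 0
    if r.1 ≠ 0 ∧ r.2 ≠ 0 then some (r.1 + r.2) else pvALoop Aset Bset highest k

def maximumGcdAndSum (A : List Int) (B : List Int) : Int :=
  match PySem.List.max? A (fun y => y), PySem.List.max? B (fun y => y) with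
  | some max_a, some max_b =>
    let maximum_possible_factor := min max_a max_b
    let highest_val := max max_a max_b
    let As := PySem.Set.ofList A
    let Bs := PySem.Set.ofList B
    -- Python returns None when the search fails (excluded by Pre_): 0 here
    (pvALoop As Bs highest_val maximum_possible_factor.toNat).getD 0
  | _, _ => 0  -- Python raises ValueError on an empty list (excluded by Pre_)

-- ===== PORT B =====
-- _best(d, S): running max over S of the positive elements divisible by d (0 if none)
def pvBest (d : Int) (S : List Int) : Int :=
  S.foldl (fun m x => if 1 ≤ x ∧ PySem.Int.mod x d = 0 ∧ m < x then x else m) 0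

-- 'for d in range(limit, 0, -1)' of Source B as descending recursion; 0 = loop fell through (Python B returns None there)
def pvBLoop (A B : List Int) : Nat → Int
  | 0 => 0
  | k+1 =>
    let d : Int := (k : Int) + 1
    let a := pvBest d A
    if a ≠ 0 then
      let b := pvBest d B
      if b ≠ 0 then a + b else pvBLoop A B k
    else pvBLoop A B k

def maximumGcdAndSum_alt (A : List Int) (B : List Int) : Int :=
  match PySem.List.max? A (fun y => y) with
  | none => 0  -- Python raises ValueError on an empty list (excluded by Pre_)
  | some ma =>
    match PySem.List.max? B (fun y => y) with
    | none => 0  -- Python raises ValueError on an empty list (excluded by Pre_)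
    | some mb => pvBLoop A B (min ma mb).toNat

-- ===== PRECONDITION & SPEC =====
-- Pre_ excludes empty lists (Python max raises ValueError) and inputs where some list has no
-- positive element: the search then finds no gcd and Python A returns None, not an int.
def Pre_maximumGcdAndSum (A : List Int) (B : List Int) : Prop :=
  A ≠ [] ∧ B ≠ [] ∧ (∃ a ∈ A, 1 ≤ a) ∧ (∃ b ∈ B, 1 ≤ b)
instance (A : List Int) (B : List Int) : Decidable (Pre_maximumGcdAndSum A B) := by unfold Pre_maximumGcdAndSum; infer_instance

def pvWitness_maximumGcdAndSum : List Int × List Int := ([4, 6, -2], [9, 15])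

def Spec_maximumGcdAndSum (A : List Int) (B : List Int) (out : Int) : Prop := out = maximumGcdAndSum_alt A B
instance (A : List Int) (B : List Int) (out : Int) : Decidable (Spec_maximumGcdAndSum A B out) := by unfold Spec_maximumGcdAndSum; infer_instance

-- ===== CLAIM (what is proved, stated in full; the proofs are below) =====
def Claim_equal_maximumGcdAndSum : Prop := ∀ (A : List Int) (B : List Int), Dom_maximumGcdAndSum A B → Pre_maximumGcdAndSum A B → Spec_maximumGcdAndSum A B (maximumGcdAndSum A B)

-- ===== LEMMAS AND PROOFS =====

-- max over the elements of s that are positive, divisible by d and ≤ x (0 if none)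
def pvG (d x : Int) (s : List Int) : Int :=
  (s.filter (fun a => decide (1 ≤ a ∧ d ∣ a ∧ a ≤ x))).foldl max 0

theorem pvFoldlMaxLe (l : List Int) (c b : Int) (hc : c ≤ b) (h : ∀ a ∈ l, a ≤ b) :
    l.foldl max c ≤ b := by
  induction l generalizing c with
  | nil => exact hc
  | cons a t ih =>
    exact ih (max c a) (by have := h a (by simp); omega) (fun y hy => h y (by simp [hy]))

theorem pvG_neg (d x : Int) (s : List Int) (hx : x < 1) : pvG d x s = 0 := by
  unfold pvG
  have : s.filter (fun a => decide (1 ≤ a ∧ d ∣ a ∧ a ≤ x)) = [] := by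
    rw [List.filter_eq_nil_iff]
    intro a _
    simp only [decide_eq_true_eq]
    rintro ⟨h1, _, h3⟩; omega
  rw [this]; rfl

theorem pvG_mem (d x : Int) (s : List Int) (hx : 1 ≤ x) (hd : d ∣ x) (hm : x ∈ s) :
    pvG d x s = x := by
  unfold pvG
  apply le_antisymm
  · apply pvFoldlMaxLe _ _ _ (by omega)
    intro a ha
    simp only [List.mem_filter, decide_eq_true_eq] at ha
    exact ha.2.2.2
  · exact (PySem.List.le_foldl_max _ 0).2 x
      (by simp only [List.mem_filter, decide_eq_true_eq]; exact ⟨hm, hx, hd, le_refl x⟩)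

theorem pvG_step (d x : Int) (s : List Int) (hd : 0 < d) (hdx : d ∣ x) (hm : x ∉ s) :
    pvG d x s = pvG d (x - d) s := by
  unfold pvG
  congr 1
  apply List.filter_congr
  intro a ha
  simp only [decide_eq_decide]
  constructor
  · rintro ⟨h1, h2, h3⟩
    refine ⟨h1, h2, ?_⟩
    have hne : a ≠ x := fun h => hm (h ▸ ha)
    have hdvd : d ∣ (x - a) := dvd_sub hdx h2
    have hpos : 0 < x - a := by omega
    have := Int.le_of_dvd hpos hdvd
    omega
  · rintro ⟨h1, h2, h3⟩
    exact ⟨h1, h2, by omega⟩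

theorem pvAInner_spec (As Bs : PySem.Set Int) (k : Nat) (x fnum snum : Int) :
    ((k : Int) + 1) ∣ x →
    pvAInner As Bs k x fnum snum =
      ((if fnum = 0 then pvG ((k : Int) + 1) x As else fnum),
       (if snum = 0 then pvG ((k : Int) + 1) x Bs else snum)) := by
  fun_induction pvAInner As Bs k x fnum snum with
  | case1 x fnum snum hx fnum' snum' ih =>
    intro hdx
    have hdx' : ((k : Int) + 1) ∣ (x - ((k : Int) + 1)) := dvd_sub hdx dvd_rfl
    have hx0 : ¬ (x = 0) := by omega
    rw [ih hdx']
    simp only [Prod.mk.injEq]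
    constructor
    · simp only [fnum']
      by_cases hf : fnum = 0
      · subst hf
        by_cases hc : PySem.Set.contains As x = true
        · have hmem : x ∈ As := by simpa [PySem.Set.contains] using hc
          simp [hmem, hx0, pvG_mem _ _ _ hx hdx hmem]
        · have hnm : x ∉ As := by simpa [PySem.Set.contains] using hc
          simp [hnm]
          exact (pvG_step _ _ _ (by omega) hdx hnm).symm
      · simp [hf]
    · simp only [snum']
      by_cases hf : snum = 0
      · subst hf
        by_cases hc : PySem.Set.contains Bs x = true
        · have hmem : x ∈ Bs := by simpa [PySem.Set.contains] using hc
          simp [hmem, hx0, pvG_mem _ _ _ hx hdx hmem]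
        · have hnm : x ∉ Bs := by simpa [PySem.Set.contains] using hc
          simp [hnm]
          exact (pvG_step _ _ _ (by omega) hdx hnm).symm
      · simp [hf]
  | case2 x fnum snum hx =>
    intro hdx
    have hx1 : x < 1 := by omega
    rw [pvG_neg _ _ _ hx1, pvG_neg _ _ _ hx1]
    by_cases hf : fnum = 0 <;> by_cases hs : snum = 0 <;> simp [hf, hs]

theorem pvFoldlMaxCongr (l1 l2 : List Int) (h : ∀ a, a ∈ l1 ↔ a ∈ l2) :
    l1.foldl max 0 = l2.foldl max 0 := by
  have key : ∀ (u v : List Int), (∀ a, a ∈ u ↔ a ∈ v) → u.foldl max 0 ≤ v.foldl max 0 := by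
    intro u v huv
    rcases PySem.List.foldl_max_mem u 0 with h0 | hm
    · rw [h0]; exact (PySem.List.le_foldl_max v 0).1
    · exact (PySem.List.le_foldl_max v 0).2 _ ((huv _).mp hm)
  exact le_antisymm (key l1 l2 h) (key l2 l1 (fun a => (h a).symm))

theorem pvBest_filter (d : Int) (S : List Int) (c : Int) :
    S.foldl (fun m x => if 1 ≤ x ∧ PySem.Int.mod x d = 0 ∧ m < x then x else m) c
      = (S.filter (fun a => decide (1 ≤ a ∧ d ∣ a))).foldl max c := by
  induction S generalizing c with
  | nil => rfl
  | cons a t ih =>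
    rw [List.foldl_cons, List.filter_cons]
    by_cases h1 : 1 ≤ a ∧ d ∣ a
    · have hmod := (PySem.Int.mod_eq_zero_iff_dvd a d).mpr h1.2
      have hstep : (if 1 ≤ a ∧ PySem.Int.mod a d = 0 ∧ c < a then a else c) = max c a := by
        by_cases h : c < a
        · rw [if_pos ⟨h1.1, hmod, h⟩]; omega
        · rw [if_neg (by rintro ⟨_, _, hh⟩; exact h hh)]; omega
      rw [hstep, if_pos (show decide (1 ≤ a ∧ d ∣ a) = true by simpa using h1),
        List.foldl_cons, ih]
    · have hstep : (if 1 ≤ a ∧ PySem.Int.mod a d = 0 ∧ c < a then a else c) = c := by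
        rw [if_neg]
        rintro ⟨x1, x2, _⟩
        exact h1 ⟨x1, (PySem.Int.mod_eq_zero_iff_dvd a d).mp x2⟩
      rw [hstep, if_neg (show ¬ decide (1 ≤ a ∧ d ∣ a) = true by simpa using h1), ih]

theorem pvBest_eq_pvG (d x : Int) (S : List Int)
    (hb : ∀ a ∈ S, 1 ≤ a → d ∣ a → a ≤ x) :
    pvBest d S = pvG d x S := by
  unfold pvBest pvG
  rw [pvBest_filter]
  apply pvFoldlMaxCongr
  intro a
  simp only [List.mem_filter, decide_eq_true_eq]
  constructor
  · rintro ⟨ha, h1, h2⟩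
    exact ⟨ha, h1, h2, hb a ha h1 h2⟩
  · rintro ⟨ha, h1, h2, _⟩
    exact ⟨ha, h1, h2⟩

theorem pvLoop_eq (A B : List Int) (H : Int)
    (hA : ∀ a ∈ A, a ≤ H) (hB : ∀ b ∈ B, b ≤ H) :
    ∀ n : Nat, (pvALoop (PySem.Set.ofList A) (PySem.Set.ofList B) H n).getD 0 = pvBLoop A B n := by
  intro n
  induction n with
  | zero => rfl
  | succ k ih =>
    rw [pvALoop, pvBLoop]
    have hd : (0 : Int) < (k : Int) + 1 := by omega
    have hxd : ((k : Int) + 1) ∣ (((k : Int) + 1) * (PySem.Int.floordiv H ((k : Int) + 1))) :=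
      Dvd.intro _ rfl
    rw [pvAInner_spec _ _ _ _ _ _ hxd]
    have hbound : ∀ (S : List Int), (∀ a ∈ S, a ≤ H) → ∀ a ∈ S, 1 ≤ a → ((k : Int) + 1) ∣ a →
        a ≤ ((k : Int) + 1) * (PySem.Int.floordiv H ((k : Int) + 1)) := by
      intro S hS a ha h1 h2
      rw [PySem.Int.floordiv_eq_ediv_of_pos hd]
      obtain ⟨c, hc⟩ := h2
      subst hc
      have hle : c ≤ H / ((k : Int) + 1) := by
        rw [Int.le_ediv_iff_mul_le hd]
        calc c * ((k : Int) + 1) = ((k : Int) + 1) * c := by ring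
        _ ≤ H := hS _ ha
      calc ((k : Int) + 1) * c ≤ ((k : Int) + 1) * (H / ((k : Int) + 1)) := by
            exact mul_le_mul_of_nonneg_left hle (by omega)
      _ = _ := rfl
    have hofA : pvG ((k : Int) + 1) (((k : Int) + 1) * (PySem.Int.floordiv H ((k : Int) + 1))) (PySem.Set.ofList A) = pvBest ((k : Int) + 1) A := by
      have h1 : pvG ((k : Int) + 1) (((k : Int) + 1) * (PySem.Int.floordiv H ((k : Int) + 1))) (PySem.Set.ofList A)
          = pvG ((k : Int) + 1) (((k : Int) + 1) * (PySem.Int.floordiv H ((k : Int) + 1))) A := by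
        unfold pvG
        apply pvFoldlMaxCongr
        intro a
        simp [List.mem_filter, PySem.Set.mem_ofList]
      rw [h1]
      exact (pvBest_eq_pvG _ _ _ (hbound A hA)).symm
    have hofB : pvG ((k : Int) + 1) (((k : Int) + 1) * (PySem.Int.floordiv H ((k : Int) + 1))) (PySem.Set.ofList B) = pvBest ((k : Int) + 1) B := by
      have h1 : pvG ((k : Int) + 1) (((k : Int) + 1) * (PySem.Int.floordiv H ((k : Int) + 1))) (PySem.Set.ofList B)
          = pvG ((k : Int) + 1) (((k : Int) + 1) * (PySem.Int.floordiv H ((k : Int) + 1))) B := by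
        unfold pvG
        apply pvFoldlMaxCongr
        intro a
        simp [List.mem_filter, PySem.Set.mem_ofList]
      rw [h1]
      exact (pvBest_eq_pvG _ _ _ (hbound B hB)).symm
    simp only [hofA, hofB]
    by_cases ha : pvBest ((k : Int) + 1) A = 0 <;> by_cases hb2 : pvBest ((k : Int) + 1) B = 0 <;>
      simp [ha, hb2, ih]

-- ===== VERDICT (by name: the statement is the Claim_ definition above) =====
theorem maximumGcdAndSum_spec : Claim_equal_maximumGcdAndSum := by
  intro A B _hdom hpre
  unfold Spec_maximumGcdAndSum maximumGcdAndSum maximumGcdAndSum_alt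
  obtain ⟨hAne, hBne, -, -⟩ := hpre
  obtain ⟨ma, hma⟩ : ∃ m, PySem.List.max? A (fun y => y) = some m := by
    cases h : PySem.List.max? A (fun y => y) with
    | none => exact absurd ((PySem.List.max?_eq_none_iff _ _).mp h) hAne
    | some m => exact ⟨m, rfl⟩
  obtain ⟨mb, hmb⟩ : ∃ m, PySem.List.max? B (fun y => y) = some m := by
    cases h : PySem.List.max? B (fun y => y) with
    | none => exact absurd ((PySem.List.max?_eq_none_iff _ _).mp h) hBne
    | some m => exact ⟨m, rfl⟩
  rw [hma, hmb]
  exact pvLoop_eq A B (max ma mb)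
    (fun a ha => le_trans (PySem.List.max?_isMax hma a ha) (le_max_left _ _))
    (fun b hb => le_trans (PySem.List.max?_isMax hmb b hb) (le_max_right _ _))
    (min ma mb).toNat
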